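-- pv_equiv track=rewrite | github.com/kimwoo123/PS | 프로그래머스/2/131704. 택배상자/택배상자.py | solution
-- ===== SOURCE A (Python) =====
-- def solution(order):
--     answer = 0
--     l = len(order)
--     box_list = list(range(l, 0, -1))
--     stack = []
--     for target in order:
--         if stack and stack[-1] == target:
--             del stack[-1]
--             answer += 1
--             continue
--         flag = True
--         while box_list:
--             box = box_list.pop()
--             if box == target:
--                 flag = False
--                 answer += 1
--                 break
--             stack.append(box)
--         if flag:
--             break
--     return answer
-- ===== SOURCE B (Python) =====
-- def solution(order):
--     # Stack-free reformulation: the side stack is always the increasing list of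
--     # not-yet-loaded boxes 1..M (M = highest box taken off the conveyor), so we
--     # keep only a served-flag table, the running maximum M, and a pointer p that
--     # slides down over served flags to find the implicit stack top.
--     n = len(order)
--     served = [False] * (n + 1)
--     M = 0          # highest box taken off the conveyor so far
--     p = 0          # upper bound for the implicit stack top
--     answer = 0
--     for t in order:
--         if t > M:                 # t would still be on the conveyor
--             if t > n:
--                 break             # conveyor runs out before reaching t
--             M = t
--             p = t - 1
--         else:                     # t must be the implicit stack top
--             while p > 0 and served[p]:
--                 p -= 1
--             if p != t or p == 0:
--                 break
--             p -= 1
--         served[t] = True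
--         answer += 1
--     return answer
-- ===== Notes on version B (the rewrite author's own statement) =====
-- stated objective: alternative
-- what changed: B removes A's explicit stack and pre-built reversed conveyor list entirely: it exploits the invariant that the side stack is always the increasing list of not-yet-loaded boxes 1..M, keeping only a boolean served table, the running maximum M, and a pointer that slides down over served flags to locate the implicit stack top.
import Mathlib
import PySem

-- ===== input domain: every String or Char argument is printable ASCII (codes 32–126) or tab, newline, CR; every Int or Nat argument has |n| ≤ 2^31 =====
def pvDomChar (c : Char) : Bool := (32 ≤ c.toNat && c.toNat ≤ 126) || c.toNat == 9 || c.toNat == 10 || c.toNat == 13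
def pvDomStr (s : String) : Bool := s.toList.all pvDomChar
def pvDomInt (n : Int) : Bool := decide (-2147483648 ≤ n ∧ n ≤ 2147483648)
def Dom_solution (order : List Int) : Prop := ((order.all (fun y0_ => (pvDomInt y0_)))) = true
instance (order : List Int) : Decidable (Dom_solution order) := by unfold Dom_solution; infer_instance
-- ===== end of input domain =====

-- B drops A's explicit stack and reversed conveyor list: the stack is always the
-- increasing list of not-yet-loaded boxes 1..M, so B keeps only a served-flag
-- table, the running maximum M and a sliding top pointer (objective: alternative).

-- ===== PORT A =====
-- inner 'while box_list:' loop: pops from the END of box_list (Python .pop()),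
-- pushes non-matching boxes onto stack; returns (box_list, stack, flag)
def aWhile (boxes stack : List Int) (target : Int) : List Int × List Int × Bool :=
  match h : boxes.getLast? with
  | none => (boxes, stack, true)
  | some box =>
    if box = target then (boxes.dropLast, stack, false)
    else aWhile boxes.dropLast (stack ++ [box]) target
termination_by boxes.length
decreasing_by
  have : boxes ≠ [] := by intro hnil; simp [hnil] at h
  simpa [List.length_dropLast] using Nat.sub_lt (List.length_pos_iff.mpr this) one_pos

-- the 'for target in order:' loop carrying (answer, box_list, stack)
def aFor : List Int → Int → List Int → List Int → Int
  | [], ans, _, _ => ans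
  | t :: ts, ans, boxes, stack =>
    if stack ≠ [] ∧ stack.getLast? = some t then
      aFor ts (ans + 1) boxes stack.dropLast
    else
      match aWhile boxes stack t with
      | (boxes', stack', flag) =>
        if flag then ans  -- 'break': return answer
        else aFor ts (ans + 1) boxes' stack'

def solution (order : List Int) : Int :=
  aFor order 0 (PySem.List.pyRange (order.length : Int) 0 (-1)) []

-- ===== PORT B =====
-- 'while p > 0 and served[p]: p -= 1'  (p ≥ 1 inside the loop, so served[p] is
-- a plain non-negative index: getD p.toNat is exact here)
def bSlide (served : List Bool) (p : Int) : Int :=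
  if p > 0 ∧ served.getD p.toNat false = true then bSlide served (p - 1) else p
termination_by p.toNat
decreasing_by omega

-- the 'for t in order:' loop carrying (served, M, p, answer); 'served[t] = True'
-- is only reached with 1 ≤ t ≤ n, so List.set t.toNat is exact there
def bFor : List Int → List Bool → Int → Int → Int → Int → Int
  | [], _, _, _, ans, _ => ans
  | t :: ts, served, M, p, ans, n =>
    if t > M then
      if t > n then ans  -- 'break'
      else bFor ts (served.set t.toNat true) t (t - 1) (ans + 1) n
    else
      let p' := bSlide served p
      if p' ≠ t ∨ p' = 0 then ans  -- 'break'
      else bFor ts (served.set t.toNat true) M (p' - 1) (ans + 1) n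

def solution_alt (order : List Int) : Int :=
  bFor order (List.replicate (order.length + 1) false) 0 0 0 (order.length : Int)

-- ===== PRECONDITION & SPEC =====
def Spec_solution (order : List Int) (out : Int) : Prop := out = solution_alt order
instance (order : List Int) (out : Int) : Decidable (Spec_solution order out) := by unfold Spec_solution; infer_instance

-- ===== CLAIM (what is proved, stated in full; the proofs are below) =====
def Claim_equal_solution : Prop := ∀ (order : List Int), Dom_solution order → Spec_solution order (solution order)

-- ===== LEMMAS AND PROOFS =====

-- the conveyor at any moment is the descending list [n, n-1, …, c]
def descList (n c : Int) : List Int :=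
  if c ≤ n then descList n (c + 1) ++ [c] else []
termination_by (n + 1 - c).toNat
decreasing_by omega

-- ascending list [a, a+1, …, b]
def ascList (a b : Int) : List Int :=
  if a ≤ b then a :: ascList (a + 1) b else []
termination_by (b + 1 - a).toNat
decreasing_by omega

-- the implicit stack: unloaded boxes of 1..M in increasing order
def stackOf (served : List Bool) (M : Int) : List Int :=
  (ascList 1 M).filter (fun i => !(served.getD i.toNat false))

def LoopInv (n : Int) (served : List Bool) (M p : Int) : Prop :=
  0 ≤ p ∧ p ≤ M ∧ M ≤ n ∧
  served.length = n.toNat + 1 ∧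
  (∀ i : Int, p < i → i ≤ M → served.getD i.toNat false = true) ∧
  (∀ i : Int, M < i → served.getD i.toNat false = false) ∧
  served.getD 0 false = false

theorem aWhile_nil (stack : List Int) (t : Int) : aWhile [] stack t = ([], stack, true) := by
  rw [aWhile]; rfl

theorem aWhile_concat (boxes stack : List Int) (box t : Int) :
    aWhile (boxes ++ [box]) stack t =
      if box = t then (boxes, stack, false) else aWhile boxes (stack ++ [box]) t := by
  rw [aWhile]
  split
  · simp_all
  · rename_i b hb
    have hbb : b = box := by simpa using hb.symm
    subst hbb
    simp

theorem descList_eq_reverse (n c : Int) : descList n c = (PySem.List.pyRange c (n + 1) 1).reverse := by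
  fun_induction descList n c with
  | case1 c h ih => rw [PySem.List.pyRange_one_cons (by omega), List.reverse_cons, ih]
  | case2 c h => rw [PySem.List.pyRange_one_eq_nil (by omega)]; rfl

theorem solution_boxes (order : List Int) :
    PySem.List.pyRange (order.length : Int) 0 (-1) = descList (order.length : Int) 1 := by
  rw [PySem.List.pyRange_neg_one_eq_reverse, descList_eq_reverse]; norm_num

theorem ascList_nil (a b : Int) (h : b < a) : ascList a b = [] := by
  rw [ascList, if_neg (by omega)]

theorem ascList_cons (a b : Int) (h : a ≤ b) : ascList a b = a :: ascList (a + 1) b := by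
  rw [ascList, if_pos h]

theorem ascList_concat (a b : Int) (h : a ≤ b) : ascList a b = ascList a (b - 1) ++ [b] := by
  fun_induction ascList a b with
  | case1 a h1 ih =>
    by_cases hab : a = b
    · subst hab
      rw [ascList_nil (a + 1) a (by omega), ascList_nil a (a - 1) (by omega)]
      rfl
    · rw [ih (by omega), ascList_cons a (b - 1) (by omega)]
      rfl
  | case2 a h1 => omega

theorem ascList_append (a m b : Int) (h1 : a ≤ m + 1) (h2 : m ≤ b) :
    ascList a b = ascList a m ++ ascList (m + 1) b := by
  induction hfuel : (m + 1 - a).toNat using Nat.strong_induction_on generalizing a with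
  | _ fuel ih =>
    by_cases ham : a = m + 1
    · subst ham
      rw [ascList_nil (m + 1) m (by omega), List.nil_append]
    · rw [ascList_cons a b (by omega), ascList_cons a m (by omega),
        ih (m + 1 - (a + 1)).toNat (by omega) (a + 1) (by omega) rfl]
      rfl

theorem mem_ascList {a b i : Int} : i ∈ ascList a b ↔ a ≤ i ∧ i ≤ b := by
  fun_induction ascList a b with
  | case1 a h ih => simp [ih]; omega
  | case2 a h => simp; omega

-- A's inner loop when the target is not on the remaining conveyor [c..n]: miss
theorem aWhile_miss (n t : Int) : ∀ c (stack : List Int), (t < c ∨ n < t) →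
    aWhile (descList n c) stack t = ([], stack ++ ascList c n, true) := by
  intro c
  fun_induction descList n c with
  | case1 c h ih =>
    intro stack hmiss
    rw [aWhile_concat, if_neg (by omega), ih (stack ++ [c]) (by omega),
      ascList_cons c n h]
    simp
  | case2 c h =>
    intro stack hmiss
    rw [aWhile_nil, ascList_nil c n (by omega)]
    simp

-- A's inner loop when the target is on the conveyor: hit
theorem aWhile_hit (n t : Int) : ∀ c (stack : List Int), c ≤ t → t ≤ n →
    aWhile (descList n c) stack t = (descList n (t + 1), stack ++ ascList c (t - 1), false) := by
  intro c
  fun_induction descList n c with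
  | case1 c h ih =>
    intro stack hct htn
    by_cases hc : c = t
    · subst hc
      rw [aWhile_concat, if_pos rfl, ascList_nil c (c - 1) (by omega)]
      simp
    · rw [aWhile_concat, if_neg hc, ih (stack ++ [c]) (by omega) htn,
        ascList_cons c (t - 1) (by omega)]
      simp
  | case2 c h =>
    intro stack hct htn
    omega

-- the slide loop stops exactly at the greatest unserved index ≤ p (or at 0)
theorem bSlide_eq (served : List Bool) (q : Int) : ∀ p, 0 ≤ q → q ≤ p →
    (∀ i : Int, q < i → i ≤ p → served.getD i.toNat false = true) →
    (q = 0 ∨ served.getD q.toNat false = false) →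
    bSlide served p = q := by
  intro p
  induction hfuel : (p - q).toNat using Nat.strong_induction_on generalizing p with
  | _ fuel ih =>
    intro hq hqp hall hstop
    by_cases hpq : p = q
    · subst hpq
      rcases hstop with h0 | hf
      · rw [bSlide, if_neg (by omega)]
      · have hng : ¬ (p > 0 ∧ served.getD p.toNat false = true) := by
          rintro ⟨-, hc⟩
          rw [hf] at hc
          exact Bool.false_ne_true hc
        rw [bSlide, if_neg hng]
    · rw [bSlide, if_pos ⟨by omega, hall p (by omega) le_rfl⟩]
      exact ih (p - 1 - q).toNat (by omega) (p - 1) rfl hq (by omega)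
        (fun i h1 h2 => hall i h1 (by omega)) hstop

-- structure of the implicit stack: empty (all served) or ends with its maximum
theorem stackOf_top (served : List Bool) (M : Int) (hM : 0 ≤ M) :
    (stackOf served M = [] ∧ ∀ i : Int, 1 ≤ i → i ≤ M → served.getD i.toNat false = true) ∨
    (∃ s : Int, 1 ≤ s ∧ s ≤ M ∧ served.getD s.toNat false = false ∧
      (∀ i : Int, s < i → i ≤ M → served.getD i.toNat false = true) ∧
      stackOf served M = stackOf served (s - 1) ++ [s]) := by
  induction hfuel : M.toNat using Nat.strong_induction_on generalizing M with
  | _ fuel ih =>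
    by_cases hM0 : M = 0
    · left
      subst hM0
      constructor
      · simp [stackOf, ascList_nil 1 0 (by omega)]
      · intros; omega
    · have hsplit : stackOf served M
          = stackOf served (M - 1) ++ (if served.getD M.toNat false = true then [] else [M]) := by
        unfold stackOf
        rw [ascList_concat 1 M (by omega), List.filter_append]
        congr 1
        simp only [List.filter_cons, List.filter_nil]
        cases h : served.getD M.toNat false <;> simp [h]
      by_cases hsM : served.getD M.toNat false = true
      · rw [hsM, if_pos rfl, List.append_nil] at hsplit
        rcases ih (M - 1).toNat (by omega) (M - 1) (by omega) rfl with ⟨he, hall⟩ | ⟨s, h1, h2, h3, h4, h5⟩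
        · left
          refine ⟨by rw [hsplit, he], fun i hi1 hi2 => ?_⟩
          by_cases hiM : i = M
          · subst hiM; exact hsM
          · exact hall i hi1 (by omega)
        · right
          refine ⟨s, h1, by omega, h3, fun i hi1 hi2 => ?_, by rw [hsplit, h5]⟩
          by_cases hiM : i = M
          · subst hiM; exact hsM
          · exact h4 i hi1 (by omega)
      · right
        rw [if_neg hsM] at hsplit
        refine ⟨M, by omega, le_rfl, by simpa using hsM, fun i hi1 hi2 => by omega, by simpa using hsplit⟩

theorem getD_set_ne (served : List Bool) (t i : Int) (ht : 0 ≤ t) (hi : 0 ≤ i) (h : i ≠ t) :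
    (served.set t.toNat true).getD i.toNat false = served.getD i.toNat false := by
  have hne : t.toNat ≠ i.toNat := by omega
  simp [List.getD, List.getElem?_set_ne hne]

theorem getD_set_self (served : List Bool) (t : Int) (ht : 0 ≤ t) (hlen : t.toNat < served.length) :
    (served.set t.toNat true).getD t.toNat false = true := by
  simp [List.getD, hlen]

-- feeding boxes M+1..t-1 and loading t: the new implicit stack
theorem stackOf_feed (served : List Bool) (n M t : Int) (hM : 0 ≤ M) (hMt : M < t)
    (htn : t ≤ n) (hlen : served.length = n.toNat + 1)
    (hout : ∀ i : Int, M < i → served.getD i.toNat false = false) :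
    stackOf (served.set t.toNat true) t = stackOf served M ++ ascList (M + 1) (t - 1) := by
  unfold stackOf
  rw [ascList_append 1 M t (by omega) (by omega), List.filter_append]
  congr 1
  · apply List.filter_congr
    intro i hi
    rcases mem_ascList.mp hi with ⟨h1, h2⟩
    rw [getD_set_ne served t i (by omega) (by omega) (by omega)]
  · rw [ascList_concat (M + 1) t (by omega), List.filter_append]
    have h1 : (ascList (M + 1) (t - 1)).filter
        (fun i => !((served.set t.toNat true).getD i.toNat false)) = ascList (M + 1) (t - 1) := by
      apply List.filter_eq_self.mpr
      intro i hi
      rcases mem_ascList.mp hi with ⟨hi1, hi2⟩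
      rw [getD_set_ne served t i (by omega) (by omega) (by omega), hout i (by omega)]
      rfl
    have h2 : List.filter (fun i => !((served.set t.toNat true).getD i.toNat false)) [t] = [] := by
      simp only [List.filter_cons, List.filter_nil]
      rw [getD_set_self served t (by omega) (by omega)]
      rfl
    rw [h1, h2, List.append_nil]

-- popping the top t of the implicit stack
theorem stackOf_pop (served : List Bool) (M t : Int) (ht1 : 1 ≤ t) (htM : t ≤ M)
    (hlen : t.toNat < served.length)
    (hab : ∀ i : Int, t < i → i ≤ M → served.getD i.toNat false = true) :
    stackOf (served.set t.toNat true) M = stackOf served (t - 1) := by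
  unfold stackOf
  rw [ascList_append 1 (t - 1) M (by omega) (by omega), List.filter_append]
  have h1 : (ascList 1 (t - 1)).filter
      (fun i => !((served.set t.toNat true).getD i.toNat false))
      = (ascList 1 (t - 1)).filter (fun i => !(served.getD i.toNat false)) := by
    apply List.filter_congr
    intro i hi
    rcases mem_ascList.mp hi with ⟨hi1, hi2⟩
    rw [getD_set_ne served t i (by omega) (by omega) (by omega)]
  have h2 : (ascList (t - 1 + 1) M).filter
      (fun i => !((served.set t.toNat true).getD i.toNat false)) = [] := by
    apply List.filter_eq_nil_iff.mpr
    intro i hi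
    rcases mem_ascList.mp hi with ⟨hi1, hi2⟩
    by_cases hit : i = t
    · subst hit
      rw [getD_set_self served i (by omega) hlen]
      simp
    · rw [getD_set_ne served t i (by omega) (by omega) hit, hab i (by omega) hi2]
      simp
  rw [h1, h2, List.append_nil]

-- main simulation lemma
theorem for_eq (n : Int) : ∀ (ts : List Int) (served : List Bool) (M p ans : Int),
    LoopInv n served M p →
    aFor ts ans (descList n (M + 1)) (stackOf served M) = bFor ts served M p ans n := by
  intro ts
  induction ts with
  | nil => intro served M p ans _; rfl
  | cons t ts ih =>
    intro served M p ans hinv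
    obtain ⟨hp0, hpM, hMn, hlen, habove, hout, h0⟩ := hinv
    rw [aFor, bFor]
    rcases stackOf_top served M (by omega) with ⟨he, hall⟩ | ⟨s, hs1, hsM, hsf, hsab, hseq⟩
    · -- implicit stack empty: every box 1..M already loaded
      have hslide : bSlide served p = 0 :=
        bSlide_eq served 0 p le_rfl hp0 (fun i h1 h2 => hall i (by omega) (by omega)) (Or.inl rfl)
      rw [he]
      by_cases ht : t > M
      · rw [if_pos ht]
        by_cases htn : t > n
        · rw [if_pos htn, if_neg (by simp), aWhile_miss n t (M + 1) [] (by omega)]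
          simp
        · rw [if_neg htn, if_neg (by simp),
            aWhile_hit n t (M + 1) [] (by omega) (by omega)]
          simp only [if_neg (Bool.false_ne_true)]
          have hfeed := stackOf_feed served n M t (by omega) (by omega) (by omega) hlen hout
          rw [he] at hfeed
          rw [List.nil_append] at hfeed ⊢
          rw [← hfeed]
          exact ih (served.set t.toNat true) t (t - 1) (ans + 1)
            ⟨by omega, by omega, by omega, by simp [hlen],
             fun i h1 h2 => by
               have hit : i = t := by omega
               subst hit
               exact getD_set_self served i (by omega) (by omega),
             fun i h1 => by
               rw [getD_set_ne served t i (by omega) (by omega) (by omega)]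
               exact hout i (by omega),
             by
               have hh := getD_set_ne served t 0 (by omega) le_rfl (by omega)
               simp only [Int.toNat_zero] at hh
               rw [hh]
               exact h0⟩
      · -- t ≤ M but all boxes loaded: both break
        rw [if_neg ht, if_neg (by simp), aWhile_miss n t (M + 1) [] (by omega)]
        simp [hslide]
    · -- implicit stack nonempty with top s
      have hsp : s ≤ p := by
        by_contra hc
        have := habove s (by omega) hsM
        rw [hsf] at this
        exact Bool.false_ne_true this
      have hslide : bSlide served p = s :=
        bSlide_eq served s p (by omega) hsp
          (fun i h1 h2 => hsab i h1 (by omega)) (Or.inr hsf)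
      have hlast : (stackOf served M).getLast? = some s := by
        rw [hseq]; exact List.getLast?_concat
      by_cases ht : t > M
      · rw [if_pos ht]
        have hfp : ¬ (stackOf served M ≠ [] ∧ (stackOf served M).getLast? = some t) := by
          rintro ⟨-, hc⟩
          rw [hlast] at hc
          have : s = t := by injection hc
          omega
        by_cases htn : t > n
        · rw [if_pos htn, if_neg hfp, aWhile_miss n t (M + 1) _ (by omega)]
          simp
        · rw [if_neg htn, if_neg hfp,
            aWhile_hit n t (M + 1) _ (by omega) (by omega)]
          simp only [if_neg (Bool.false_ne_true)]
          have hfeed := stackOf_feed served n M t (by omega) (by omega) (by omega) hlen hout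
          rw [← hfeed]
          exact ih (served.set t.toNat true) t (t - 1) (ans + 1)
            ⟨by omega, by omega, by omega, by simp [hlen],
             fun i h1 h2 => by
               have hit : i = t := by omega
               subst hit
               exact getD_set_self served i (by omega) (by omega),
             fun i h1 => by
               rw [getD_set_ne served t i (by omega) (by omega) (by omega)]
               exact hout i (by omega),
             by
               have hh := getD_set_ne served t 0 (by omega) le_rfl (by omega)
               simp only [Int.toNat_zero] at hh
               rw [hh]
               exact h0⟩
      · rw [if_neg ht]
        by_cases hst : s = t
        · -- target is the top: A's fast path, B's successful pop
          rw [hst] at hsf hsab hseq hlast hslide hs1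
          simp only [hslide]
          have hfp : stackOf served M ≠ [] ∧ (stackOf served M).getLast? = some t := by
            refine ⟨?_, hlast⟩
            rw [hseq]
            simp
          rw [if_pos hfp, if_neg (by omega)]
          have hdrop : (stackOf served M).dropLast = stackOf served (t - 1) := by
            rw [hseq, List.dropLast_concat]
          have hpop := stackOf_pop served M t (by omega) (by omega) (by omega) hsab
          rw [hdrop, ← hpop]
          exact ih (served.set t.toNat true) M (t - 1) (ans + 1)
            ⟨by omega, by omega, hMn, by simp [hlen],
             fun i h1 h2 => by
               by_cases hit : i = t
               · subst hit
                 exact getD_set_self served i (by omega) (by omega)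
               · rw [getD_set_ne served t i (by omega) (by omega) hit]
                 exact hsab i (by omega) h2,
             fun i h1 => by
               rw [getD_set_ne served t i (by omega) (by omega) (by omega)]
               exact hout i h1,
             by
               have hh := getD_set_ne served t 0 (by omega) le_rfl (by omega)
               simp only [Int.toNat_zero] at hh
               rw [hh]
               exact h0⟩
        · -- target not the top: both break
          simp only [hslide]
          have hfp : ¬ (stackOf served M ≠ [] ∧ (stackOf served M).getLast? = some t) := by
            rintro ⟨-, hc⟩
            rw [hlast] at hc
            have : s = t := by injection hc
            exact hst this
          rw [if_neg hfp, if_pos (Or.inl hst),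
            aWhile_miss n t (M + 1) _ (by omega)]
          simp

-- ===== VERDICT (by name: the statement is the Claim_ definition above) =====
theorem solution_spec : Claim_equal_solution := by
  intro order _
  unfold Spec_solution solution solution_alt
  rw [solution_boxes]
  have h0 : stackOf (List.replicate (order.length + 1) false) 0 = [] := by
    simp [stackOf, ascList_nil 1 0 (by omega)]
  rw [show (1 : Int) = 0 + 1 by ring, ← h0]
  refine for_eq _ order _ 0 0 0 ?_
  refine ⟨le_refl 0, le_refl 0, by positivity, by simp, by omega, ?_, ?_⟩ <;>
    · intros; simp [List.getD]
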